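-- pv_equiv track=rewrite | github.com/Wurstinator/Voltofalle | Voltofalle.py | sum_possibilities
-- ===== SOURCE A (Python) =====
-- def sum_possibilities(N, A, B, S):
--     if N == 0:
--         return
--     if N == 1:
--         if A <= S <= B:
--             yield [S]
--         else:
--             return
--
--     for x in range(A, B+1):
--         for subp in sum_possibilities(N-1, A, B, S-x):
--             yield [x] + subp
-- ===== SOURCE B (Python) =====
-- def sum_possibilities(N, A, B, S):
--     if N <= 0 or A > B:
--         return
--     vecs = [[]]
--     for _ in range(N):
--         vecs = [v + [x] for v in vecs for x in range(A, B + 1)]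
--     for v in vecs:
--         if sum(v) == S:
--             yield v
-- ===== Notes on version B (the rewrite author's own statement) =====
-- stated objective: alternative
-- what changed: Replaces A's recursive pruning generator (passing S-x down each level) with an iterative breadth-first build of all length-N tuples over [A,B] followed by a sum==S filter, yielding the same lexicographic order; Pre_ excludes N < 0 or N >= 1000 with A <= B, where A's N-deep recursion raises RecursionError under CPython's default recursion limit (with a raised limit A still returns on some of these, e.g. the cited one).
-- outside the precondition, e.g. on sum_possibilities(7584, -1, -1, -1): A returns [], B returns []
import Mathlib
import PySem

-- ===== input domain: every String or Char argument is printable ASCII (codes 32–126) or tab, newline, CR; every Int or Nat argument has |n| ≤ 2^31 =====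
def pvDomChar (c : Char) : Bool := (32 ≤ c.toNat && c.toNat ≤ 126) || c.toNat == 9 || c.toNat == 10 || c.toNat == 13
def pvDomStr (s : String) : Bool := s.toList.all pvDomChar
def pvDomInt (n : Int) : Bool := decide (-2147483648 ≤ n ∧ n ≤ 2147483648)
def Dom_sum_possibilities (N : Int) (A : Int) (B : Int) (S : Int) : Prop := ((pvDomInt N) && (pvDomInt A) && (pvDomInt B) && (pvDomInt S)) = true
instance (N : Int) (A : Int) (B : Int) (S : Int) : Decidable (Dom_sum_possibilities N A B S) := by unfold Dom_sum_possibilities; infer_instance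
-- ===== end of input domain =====

-- B replaces A's recursive pruning generator by an iterative breadth-first build of all
-- length-N tuples over [A,B] followed by a sum filter (alternative decomposition, same order).


-- ===== PORT A =====
-- Fuel = recursion depth; Python's recursion depth is exactly N on every input it returns on
-- (for N < 0 with B < A the loop body never runs, which fuel 0 reproduces; N < 0 with A ≤ B
-- diverges in Python and is excluded by Pre_).
def sumPossGo : Nat → Int → Int → Int → Int → List (List Int)
  | 0, _, _, _, _ => []
  | fuel+1, N, A, B, S =>
    let loop := (PySem.List.pyRange A (B+1) 1).flatMap
      (fun x => (sumPossGo fuel (N-1) A B (S-x)).map (fun subp => x :: subp))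
    if N == 0 then []
    else if N == 1 then
      if A ≤ S ∧ S ≤ B then [S] :: loop else []
    else loop

def sum_possibilities (N : Int) (A : Int) (B : Int) (S : Int) : List (List Int) :=
  sumPossGo N.toNat N A B S

-- ===== PORT B =====
def sum_possibilities_alt (N : Int) (A : Int) (B : Int) (S : Int) : List (List Int) :=
  if N ≤ 0 ∨ A > B then []
  else
    let vecs := (PySem.List.pyRange 0 N 1).foldl
      (fun vs _ => vs.flatMap (fun v => (PySem.List.pyRange A (B+1) 1).map (fun x => v ++ [x])))
      [[]]
    vecs.filter (fun v => v.sum == S)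

-- ===== PRECONDITION & SPEC =====
-- Pre_ excludes inputs where A's recursion depth is N with a nonempty loop range (A ≤ B): N < 0 recurses
-- forever and N ≥ 1000 exceeds CPython's default recursion limit (1000), both raising RecursionError there;
-- with B < A the loop never runs and every N is admitted.
def Pre_sum_possibilities (N : Int) (A : Int) (B : Int) (S : Int) : Prop := B < A ∨ (0 ≤ N ∧ N ≤ 999)
instance (N : Int) (A : Int) (B : Int) (S : Int) : Decidable (Pre_sum_possibilities N A B S) := by unfold Pre_sum_possibilities; infer_instance
def pvWitness_sum_possibilities : Int × Int × Int × Int := (2, 0, 2, 2)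

def Spec_sum_possibilities (N : Int) (A : Int) (B : Int) (S : Int) (out : List (List Int)) : Prop := out = sum_possibilities_alt N A B S
instance (N : Int) (A : Int) (B : Int) (S : Int) (out : List (List Int)) : Decidable (Spec_sum_possibilities N A B S out) := by unfold Spec_sum_possibilities; infer_instance

-- ===== CLAIM =====
def Claim_equal_sum_possibilities : Prop := ∀ (N : Int) (A : Int) (B : Int) (S : Int), Dom_sum_possibilities N A B S → Pre_sum_possibilities N A B S → Spec_sum_possibilities N A B S (sum_possibilities N A B S)

-- ===== LEMMAS AND PROOFS =====

-- All length-n tuples over range(A, B+1) in lexicographic order, built by prepending (A's shape).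
def sumPossTuples (A B : Int) : Nat → List (List Int)
  | 0 => [[]]
  | n+1 => (PySem.List.pyRange A (B+1) 1).flatMap (fun x => (sumPossTuples A B n).map (fun v => x :: v))

lemma flatMap_sing {α β : Type} (f : α → β) (l : List α) : l.flatMap (fun x => [f x]) = l.map f := by
  induction l <;> simp_all

-- The same tuple list also satisfies the appending recurrence used by B's loop.
lemma sumPossTuples_snoc (A B : Int) (n : Nat) :
    sumPossTuples A B (n+1) =
      (sumPossTuples A B n).flatMap
        (fun v => (PySem.List.pyRange A (B+1) 1).map (fun x => v ++ [x])) := by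
  induction n with
  | zero => simp [sumPossTuples, flatMap_sing]
  | succ n ih =>
      rw [sumPossTuples]
      conv_rhs => rw [sumPossTuples]
      simp only [List.flatMap_assoc, List.flatMap_map, List.map_map]
      rw [ih]
      simp only [List.map_flatMap, List.map_map, Function.comp_def]
      rfl

lemma sumPossFoldl (A B : Int) (l : List Int) (m : Nat) :
    l.foldl
      (fun vs _ => vs.flatMap (fun v => (PySem.List.pyRange A (B+1) 1).map (fun x => v ++ [x])))
      (sumPossTuples A B m) = sumPossTuples A B (m + l.length) := by
  induction l generalizing m with
  | nil => simp
  | cons a l ih =>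
      simp only [List.foldl_cons, List.length_cons]
      rw [← sumPossTuples_snoc, ih]
      congr 1
      omega

lemma range_filter_eq (k : Nat) : ∀ (a S : Int),
    (((List.range k).map (fun (i : Nat) => a + (i : Int))).filter (fun x => x == S)) =
      if a ≤ S ∧ S ≤ a + k - 1 then [S] else [] := by
  induction k with
  | zero =>
      intro a S
      simp only [List.range_zero, List.map_nil, List.filter_nil]
      split_ifs with h
      · omega
      · rfl
  | succ k ih =>
      intro a S
      rw [List.range_succ_eq_map]
      simp only [List.map_cons, List.map_map, List.filter_cons, Nat.cast_zero, add_zero]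
      by_cases h : a = S
      · subst h
        rw [if_pos BEq.rfl]
        have htail : (((List.range k).map ((fun (i : Nat) => a + (i : Int)) ∘ Nat.succ)).filter
            (fun x => x == a)) = [] := by
          rw [List.filter_eq_nil_iff]
          intro x hx
          simp only [List.mem_map, Function.comp, List.mem_range] at hx
          obtain ⟨i, _, rfl⟩ := hx
          simp only [beq_iff_eq]
          omega
        rw [htail]
        split_ifs with h2
        · rfl
        · exfalso; omega
      · have hne : ((a == S) = false) := by simp only [beq_eq_false_iff_ne, ne_eq]; omega
        rw [hne]
        have hcomp : ((fun (i : Nat) => a + (i : Int)) ∘ Nat.succ) = (fun (i : Nat) => (a+1) + (i : Int)) := by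
          funext i; simp only [Function.comp, Nat.succ_eq_add_one]; push_cast; ring
        simp only [Bool.false_eq_true, if_false]
        rw [hcomp, ih (a+1) S]
        split_ifs with h1 h2 h2 <;> first | rfl | omega

lemma pyRange_filter_eq (A B S : Int) :
    ((PySem.List.pyRange A (B+1) 1).filter (fun x => x == S)) =
      if A ≤ S ∧ S ≤ B then [S] else [] := by
  rw [PySem.List.pyRange_one, range_filter_eq]
  split_ifs with h1 h2 h2 <;> first | rfl | omega

lemma goEmpty (fuel : Nat) (N A B S : Int) (h : B < A) :
    sumPossGo fuel N A B S = [] := by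
  cases fuel with
  | zero => rfl
  | succ fuel =>
      rw [sumPossGo]
      rw [PySem.List.pyRange_one_eq_nil (by omega : A ≥ B + 1)]
      simp only [List.flatMap_nil]
      split_ifs with h0 h1 h2
      · rfl
      · exfalso; omega
      · rfl
      · rfl

lemma go_eq (n : Nat) : ∀ (A B S : Int),
    sumPossGo (n+1) ((n : Int)+1) A B S =
      (sumPossTuples A B (n+1)).filter (fun v => v.sum == S) := by
  induction n with
  | zero =>
      intro A B S
      have hE : (sumPossTuples A B 1).filter (fun v => v.sum == S) =
          ((PySem.List.pyRange A (B+1) 1).filter (fun x => x == S)).map (fun x => [x]) := by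
        have hgen : ∀ l : List Int,
            (l.flatMap (fun x => List.filter (fun v : List Int => v.sum == S) [[x]])) =
              (l.filter (fun x => x == S)).map (fun x => [x]) := by
          intro l
          induction l with
          | nil => rfl
          | cons a l ihl =>
              cases h : (a == S) <;> rw [List.flatMap_cons, ihl] <;>
                simp [List.filter_cons, h]
        simp only [sumPossTuples, List.filter_flatMap, List.map_cons, List.map_nil, hgen]
      rw [hE, pyRange_filter_eq]
      simp [sumPossGo]
      split_ifs <;> simp
  | succ n ih =>
      intro A B S
      have h0 : ((((n:Int)+1)+1) == 0) = false := by simp only [beq_eq_false_iff_ne, ne_eq]; omega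
      have h1 : ((((n:Int)+1)+1) == 1) = false := by simp only [beq_eq_false_iff_ne, ne_eq]; omega
      have harg : ((n:Int)+1)+1-1 = (n:Int)+1 := by ring
      rw [sumPossGo]
      simp only [Nat.cast_add, Nat.cast_one, h0, h1, Bool.false_eq_true, if_false, harg, ih]
      have hpred : ∀ x : Int, (fun v : List Int => v.sum == S - x) =
          ((fun v : List Int => v.sum == S) ∘ (fun v => x :: v)) := by
        intro x; funext v
        simp only [Function.comp, List.sum_cons]
        rw [Bool.eq_iff_iff]
        simp only [beq_iff_eq]
        omega
      simp only [hpred]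
      simp only [← List.filter_map, ← List.filter_flatMap]
      rfl

-- ===== VERDICT =====
theorem sum_possibilities_spec : Claim_equal_sum_possibilities := by
  intro N A B S _ hPre
  show sum_possibilities N A B S = sum_possibilities_alt N A B S
  by_cases h : N ≤ 0
  · have ht : N.toNat = 0 := by omega
    simp [sum_possibilities, sum_possibilities_alt, ht, h, sumPossGo]
  · by_cases hBA : B < A
    · unfold sum_possibilities sum_possibilities_alt
      rw [goEmpty _ _ _ _ _ hBA, if_pos (Or.inr (by omega))]
    · obtain ⟨n, rfl⟩ : ∃ n : Nat, N = (n:Int)+1 := ⟨(N-1).toNat, by omega⟩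
      have ht : ((n:Int)+1).toNat = n+1 := by omega
      have hlen : (((n:Int)+1) - 0).toNat = n+1 := by omega
      unfold sum_possibilities sum_possibilities_alt
      rw [ht, go_eq, if_neg (by push_neg; omega)]
      have := sumPossFoldl A B (PySem.List.pyRange 0 ((n:Int)+1) 1) 0
      simp only [PySem.List.length_pyRange_one, hlen] at this
      rw [show (sumPossTuples A B 0) = [[]] from rfl] at this
      rw [this]
      simp
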